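-- pv_equiv track=rewrite | github.com/sheba76545/popik97 | 23-5.py | f
-- ===== SOURCE A (Python) =====
-- def f(x,y):
--     if x == y:
--         return 1
--     elif x > y:
--         return 0
--     elif x == 24:
--         return 0
--     else:
--         return f(x+1, y) + f(x * 2, y) + f(x ** 2, y)
-- ===== SOURCE B (Python) =====
-- def f(x, y):
--     if x >= y:
--         return 1 if x == y else 0
--     dp = {y: 1}
--     for v in range(y - 1, x - 1, -1):
--         if v == 24:
--             dp[v] = 0
--         else:
--             dp[v] = dp[v + 1] + dp.get(2 * v, 0) + dp.get(v * v, 0)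
--     return dp.get(x, 0)
-- ===== Notes on version B (the rewrite author's own statement) =====
-- stated objective: faster
-- what changed: replaces the triple-branching exponential recursion by a bottom-up dynamic-programming loop over a dict from y down to x, computing each state once
import Mathlib
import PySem

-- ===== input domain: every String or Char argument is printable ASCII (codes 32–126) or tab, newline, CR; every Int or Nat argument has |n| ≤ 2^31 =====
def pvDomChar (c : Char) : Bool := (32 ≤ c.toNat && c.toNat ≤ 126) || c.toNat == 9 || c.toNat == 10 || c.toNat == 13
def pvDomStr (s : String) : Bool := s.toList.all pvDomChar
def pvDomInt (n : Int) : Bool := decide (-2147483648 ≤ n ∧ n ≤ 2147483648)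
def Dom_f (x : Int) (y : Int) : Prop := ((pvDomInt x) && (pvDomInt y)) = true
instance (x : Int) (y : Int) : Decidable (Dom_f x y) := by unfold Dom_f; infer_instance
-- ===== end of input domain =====

-- B replaces A's exponential triple recursion by a bottom-up DP loop over a dict (objective: faster).

-- ===== PORT A =====
-- A is a recursion on x (moves x+1, x*2, x**2); ported with a fuel parameter:
-- fuel (y - x).toNat suffices for every input on which the Python returns (Pre_f below).
def fAux : Nat → Int → Int → Int
  | 0, x, y =>
    if x = y then 1
    else if x > y then 0
    else if x = 24 then 0
    else 0
  | n + 1, x, y =>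
    if x = y then 1
    else if x > y then 0
    else if x = 24 then 0
    else fAux n (x + 1) y + fAux n (x * 2) y + fAux n (x ^ 2) y

def f (x : Int) (y : Int) : Int := fAux (y - x).toNat x y

-- ===== PORT B =====
def f_alt (x : Int) (y : Int) : Int :=
  if x ≥ y then (if x = y then 1 else 0)
  else
    let dp0 : PySem.Dict Int Int := (PySem.Dict.empty).insert y 1
    let dp := (PySem.List.pyRange (y - 1) (x - 1) (-1)).foldl
      (fun d v =>
        if v = 24 then d.insert v 0
        else d.insert v (d.getD (v + 1) 0 + d.getD (2 * v) 0 + d.getD (v * v) 0)) dp0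
    dp.getD x 0

-- ===== PRECONDITION & SPEC =====
-- Pre_f: A returns only when x ≥ 2 or x ≥ y: for x ≤ 1 < y the recursion loops forever
-- (e.g. f(0,y) calls f(0*2,y)=f(0,y)) and raises RecursionError; and for x < y with
-- y - x > 900 the +1 chain alone exceeds CPython's recursion limit, so A raises there too.
def Pre_f (x : Int) (y : Int) : Prop := y ≤ x ∨ (2 ≤ x ∧ y - x ≤ 900)
instance (x : Int) (y : Int) : Decidable (Pre_f x y) := by unfold Pre_f; infer_instance
def pvWitness_f : Int × Int := (2, 12)
def Spec_f (x : Int) (y : Int) (out : Int) : Prop := out = f_alt x y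
instance (x : Int) (y : Int) (out : Int) : Decidable (Spec_f x y out) := by unfold Spec_f; infer_instance

-- ===== CLAIM (what is proved, stated in full; the proofs are below) =====
def Claim_equal_f : Prop := ∀ (x : Int) (y : Int), Dom_f x y → Pre_f x y → Spec_f x y (f x y)

-- ===== LEMMAS AND PROOFS =====

-- A's value is branch-determined once y ≤ x, whatever the fuel.
lemma fAux_of_ge (k : Nat) (x y : Int) (h : y ≤ x) :
    fAux k x y = if x = y then 1 else 0 := by
  cases k <;> simp only [fAux] <;> (split_ifs with h1 h2 <;> omega)

lemma fAux_24 (k : Nat) (y : Int) (h : 24 < y) : fAux k 24 y = 0 := by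
  cases k <;> simp only [fAux] <;> (split_ifs <;> omega)

-- Fuel irrelevance: with enough fuel the value does not depend on the fuel (needs 2 ≤ x).
lemma fAux_irrel : ∀ (n : Nat) (x y : Int) (m : Nat), 2 ≤ x →
    (y - x).toNat ≤ n → (y - x).toNat ≤ m → fAux n x y = fAux m x y := by
  intro n
  induction n with
  | zero =>
    intro x y m hx hn _
    have hyx : y ≤ x := by omega
    rw [fAux_of_ge 0 x y hyx, fAux_of_ge m x y hyx]
  | succ n ih =>
    intro x y m hx hn hm
    by_cases hyx : y ≤ x
    · rw [fAux_of_ge _ x y hyx, fAux_of_ge m x y hyx]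
    · obtain ⟨m', rfl⟩ : ∃ m', m = m' + 1 := by
        cases m with
        | zero => omega
        | succ m' => exact ⟨m', rfl⟩
      have hne : x ≠ y := by omega
      have hngt : ¬ x > y := by omega
      by_cases h24 : x = 24
      · simp only [fAux, h24, if_true]
      · have hsq : 2 * x ≤ x * x := by nlinarith
        simp only [fAux, hne, hngt, h24, if_false, pow_two]
        rw [ih (x + 1) y m' (by omega) (by omega) (by omega),
            ih (x * 2) y m' (by omega) (by omega) (by omega),
            ih (x * x) y m' (by omega) (by omega) (by omega)]

lemma fAux_eq_f (n : Nat) (x y : Int) (hx : 2 ≤ x) (hn : (y - x).toNat ≤ n) :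
    fAux n x y = f x y :=
  fAux_irrel n x y (y - x).toNat hx hn (le_refl _)

lemma f_of_ge (x y : Int) (h : y ≤ x) : f x y = if x = y then 1 else 0 := by
  unfold f; exact fAux_of_ge _ x y h

-- The recurrence A's value satisfies on 2 ≤ x < y, x ≠ 24.
lemma f_rec (x y : Int) (hx : 2 ≤ x) (hxy : x < y) (h24 : x ≠ 24) :
    f x y = f (x + 1) y + f (x * 2) y + f (x * x) y := by
  have hsq : 2 * x ≤ x * x := by nlinarith
  obtain ⟨n, hn⟩ : ∃ n, (y - x).toNat = n + 1 := by
    refine ⟨((y - x).toNat - 1), by omega⟩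
  unfold f
  rw [hn]
  have hne : x ≠ y := by omega
  have hngt : ¬ x > y := by omega
  simp only [fAux, hne, hngt, h24, if_false, pow_two]
  rw [fAux_eq_f n (x + 1) y (by omega) (by omega),
      fAux_eq_f n (x * 2) y (by omega) (by omega),
      fAux_eq_f n (x * x) y (by omega) (by omega)]
  rfl

lemma f_24 (y : Int) (h : 24 < y) : f 24 y = 0 := by
  unfold f; exact fAux_24 _ y h

-- Loop invariant for B: after processing values down to m, dict agrees with f on all u ≥ m.
def InvF (y : Int) (d : PySem.Dict Int Int) (m : Int) : Prop :=
  ∀ u : Int, m ≤ u → d.getD u 0 = f u y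

lemma inv_step (y : Int) (d : PySem.Dict Int Int) (v : Int)
    (hv : 2 ≤ v) (hvy : v < y) (hinv : InvF y d (v + 1)) :
    InvF y (if v = 24 then d.insert v 0
           else d.insert v (d.getD (v + 1) 0 + d.getD (2 * v) 0 + d.getD (v * v) 0)) v := by
  intro u hu
  by_cases h24 : v = 24
  · simp only [h24, if_true]
    rw [PySem.Dict.getD_insert]
    split_ifs with heq
    · subst heq; subst h24; exact (f_24 y hvy).symm
    · exact hinv u (by omega)
  · simp only [h24, if_false]
    rw [PySem.Dict.getD_insert]
    split_ifs with heq
    · subst heq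
      have hsq : 2 * u ≤ u * u := by nlinarith
      rw [hinv (u + 1) (by omega), hinv (2 * u) (by omega), hinv (u * u) (by omega),
          f_rec u y hv hvy h24]
      ring_nf
    · exact hinv u (by omega)

-- Folding the loop body from v down to x preserves the invariant.
lemma inv_fold (y : Int) (x : Int) (hx : 2 ≤ x) :
    ∀ (n : Nat) (v : Int) (d : PySem.Dict Int Int), (v - (x - 1)).toNat ≤ n →
    v < y → InvF y d (v + 1) →
    InvF y ((PySem.List.pyRange v (x - 1) (-1)).foldl
      (fun d v =>
        if v = 24 then d.insert v 0
        else d.insert v (d.getD (v + 1) 0 + d.getD (2 * v) 0 + d.getD (v * v) 0)) d) x := by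
  intro n
  induction n with
  | zero =>
    intro v d hn hvy hinv
    have hvx : v ≤ x - 1 := by omega
    rw [PySem.List.pyRange_neg_one_eq_nil hvx]
    intro u hu
    exact hinv u (by omega)
  | succ n ih =>
    intro v d hn hvy hinv
    by_cases hvx : v ≤ x - 1
    · rw [PySem.List.pyRange_neg_one_eq_nil hvx]
      intro u hu
      exact hinv u (by omega)
    · rw [PySem.List.pyRange_neg_one_cons (by omega)]
      simp only [List.foldl_cons]
      exact ih (v - 1) _ (by omega) (by omega)
        (by simpa using inv_step y d v (by omega) hvy hinv)

-- ===== VERDICT (by name: the statement is the Claim_ definition above) =====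
theorem f_spec : Claim_equal_f := by
  intro x y _ hpre
  unfold Spec_f f_alt
  by_cases hge : x ≥ y
  · simp only [hge, if_true]
    rw [f_of_ge x y hge]
  · have hx : 2 ≤ x := by rcases hpre with h | ⟨h, _⟩ <;> omega
    simp only [if_neg hge]
    have hinv0 : InvF y ((PySem.Dict.empty).insert y 1) (y - 1 + 1) := by
      intro u hu
      rw [PySem.Dict.getD_insert]
      split_ifs with heq
      · subst heq; rw [f_of_ge u u (le_refl u)]; simp
      · rw [PySem.Dict.getD_empty, f_of_ge u y (by omega)]
        simp [heq]
    have := inv_fold y x hx (y - 1 - (x - 1)).toNat (y - 1)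
      ((PySem.Dict.empty).insert y 1) (le_refl _) (by omega) hinv0
    exact (this x (le_refl x)).symm
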